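-- pv_equiv track=rewrite | github.com/albeliakov/etc_task2 | model.py | lineDepend
-- ===== SOURCE A (Python) =====
-- matrixGraph = [[1, 1, 1, 1, 1, 1, 1, 1, 1, 1, 1, 1, 1, 1, 1, 1, 1, 1],  # 1
--                [0, 1, 0, 1, 1, 1, 1, 1, 1, 1, 1, 1, 1, 1, 1, 1, 1, 1],  # 2
--                [0, 0, 1, 0, 0, 0, 0, 0, 0, 0, 0, 0, 0, 0, 0, 0, 0, 0],  # 3
--                [0, 0, 0, 1, 0, 1, 1, 1, 1, 1, 1, 1, 1, 1, 1, 1, 1, 1],  # 4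
--                [0, 0, 0, 0, 1, 0, 0, 0, 0, 0, 0, 0, 0, 0, 0, 0, 0, 0],  # 5
--                [0, 0, 0, 0, 0, 1, 0, 1, 1, 1, 1, 1, 1, 1, 1, 1, 1, 1],  # 6
--                [0, 0, 0, 0, 0, 0, 1, 0, 0, 0, 0, 0, 0, 0, 0, 0, 0, 0],  # 7
--                [0, 0, 0, 0, 0, 0, 0, 1, 0, 0, 1, 1, 0, 0, 0, 0, 1, 1],  # 8
--                [0, 0, 0, 0, 0, 0, 0, 0, 1, 0, 0, 0, 1, 1, 0, 0, 0, 0],  # 9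
--                [0, 0, 0, 0, 0, 0, 0, 0, 0, 1, 0, 0, 0, 0, 1, 1, 0, 0],  # 10
--                [0, 0, 0, 0, 0, 0, 0, 0, 0, 0, 1, 0, 0, 0, 0, 0, 1, 1],  # 11
--                [0, 0, 0, 0, 0, 0, 0, 0, 0, 0, 0, 1, 0, 0, 0, 0, 0, 0],  # 12
--                [0, 0, 0, 0, 0, 0, 0, 0, 0, 0, 0, 0, 1, 0, 0, 0, 0, 0],  # 13
--                [0, 0, 0, 0, 0, 0, 0, 0, 0, 0, 0, 0, 0, 1, 0, 0, 0, 0],  # 14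
--                [0, 0, 0, 0, 0, 0, 0, 0, 0, 0, 0, 0, 0, 0, 1, 0, 0, 0],  # 15
--                [0, 0, 0, 0, 0, 0, 0, 0, 0, 0, 0, 0, 0, 0, 0, 1, 0, 0],  # 16
--                [0, 0, 0, 0, 0, 0, 0, 0, 0, 0, 0, 0, 0, 0, 0, 0, 1, 0],  # 17
--                [0, 0, 0, 0, 0, 0, 0, 0, 0, 0, 0, 0, 0, 0, 0, 0, 0, 1]]  # 18
--
-- def lineDepend(arrayPos, matrixLine=matrixGraph):
--     lineDependReturn = []
--     for posJ in range(len(arrayPos)):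
--         sliceArray = arrayPos[posJ : len(arrayPos)]
--         workArray = []
--         if len(sliceArray) > 1:
--             for i in range(1, len(sliceArray)):
--                 row = sliceArray[0] - 1
--                 col = sliceArray[i] - 1
--                 if matrixLine[row][col] == 1: # если линии зависимы, то оставляем
--                     workArray.append(sliceArray[i])
--
--             if len(workArray) > 1:
--                 delIt = 1
--                 array1 = workArray
--                 array3 = []
--                 while(delIt < len(array1)):
--                     array2 = []
--                     array3.append(array1[delIt-1])
--                     for j in range(delIt, len(array1)):
--                         row = array1[delIt-1]-1
--                         col = array1[j] - 1
--                         if matrixLine[row][col] == 0:  # если линии независимы, то оставляем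
--                             array2.append(array1[j])
--                     array1 = array3+array2
--                     delIt += 1
--                 workArray = array1
--         lineDependReturn.append([sliceArray[0]]+workArray)
--
--     return lineDependReturn
-- ===== SOURCE B (Python) =====
-- matrixGraph = [[1, 1, 1, 1, 1, 1, 1, 1, 1, 1, 1, 1, 1, 1, 1, 1, 1, 1],
--                [0, 1, 0, 1, 1, 1, 1, 1, 1, 1, 1, 1, 1, 1, 1, 1, 1, 1],
--                [0, 0, 1, 0, 0, 0, 0, 0, 0, 0, 0, 0, 0, 0, 0, 0, 0, 0],
--                [0, 0, 0, 1, 0, 1, 1, 1, 1, 1, 1, 1, 1, 1, 1, 1, 1, 1],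
--                [0, 0, 0, 0, 1, 0, 0, 0, 0, 0, 0, 0, 0, 0, 0, 0, 0, 0],
--                [0, 0, 0, 0, 0, 1, 0, 1, 1, 1, 1, 1, 1, 1, 1, 1, 1, 1],
--                [0, 0, 0, 0, 0, 0, 1, 0, 0, 0, 0, 0, 0, 0, 0, 0, 0, 0],
--                [0, 0, 0, 0, 0, 0, 0, 1, 0, 0, 1, 1, 0, 0, 0, 0, 1, 1],
--                [0, 0, 0, 0, 0, 0, 0, 0, 1, 0, 0, 0, 1, 1, 0, 0, 0, 0],
--                [0, 0, 0, 0, 0, 0, 0, 0, 0, 1, 0, 0, 0, 0, 1, 1, 0, 0],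
--                [0, 0, 0, 0, 0, 0, 0, 0, 0, 0, 1, 0, 0, 0, 0, 0, 1, 1],
--                [0, 0, 0, 0, 0, 0, 0, 0, 0, 0, 0, 1, 0, 0, 0, 0, 0, 0],
--                [0, 0, 0, 0, 0, 0, 0, 0, 0, 0, 0, 0, 1, 0, 0, 0, 0, 0],
--                [0, 0, 0, 0, 0, 0, 0, 0, 0, 0, 0, 0, 0, 1, 0, 0, 0, 0],
--                [0, 0, 0, 0, 0, 0, 0, 0, 0, 0, 0, 0, 0, 0, 1, 0, 0, 0],
--                [0, 0, 0, 0, 0, 0, 0, 0, 0, 0, 0, 0, 0, 0, 0, 1, 0, 0],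
--                [0, 0, 0, 0, 0, 0, 0, 0, 0, 0, 0, 0, 0, 0, 0, 0, 1, 0],
--                [0, 0, 0, 0, 0, 0, 0, 0, 0, 0, 0, 0, 0, 0, 0, 0, 0, 1]]
--
-- def lineDepend(arrayPos, matrixLine=matrixGraph):
--     # Single forward greedy pass per suffix: the dependent-line filter and the
--     # while-loop elimination of A are fused into one accumulator loop.
--     out = []
--     for posJ, head in enumerate(arrayPos):
--         kept = []
--         for x in arrayPos[posJ + 1:]:
--             if matrixLine[head - 1][x - 1] == 1 and all(matrixLine[k - 1][x - 1] == 0 for k in kept):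
--                 kept.append(x)
--         out.append([head] + kept)
--     return out
-- ===== Notes on version B (the rewrite author's own statement) =====
-- stated objective: simpler
-- what changed: A's per-suffix two-phase computation (index-based dependent filter, then a while-loop that repeatedly rebuilds array3+array2) is replaced by one forward accumulator pass that appends x to kept iff x depends on the suffix head and is independent of every already-kept line.
import Mathlib
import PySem

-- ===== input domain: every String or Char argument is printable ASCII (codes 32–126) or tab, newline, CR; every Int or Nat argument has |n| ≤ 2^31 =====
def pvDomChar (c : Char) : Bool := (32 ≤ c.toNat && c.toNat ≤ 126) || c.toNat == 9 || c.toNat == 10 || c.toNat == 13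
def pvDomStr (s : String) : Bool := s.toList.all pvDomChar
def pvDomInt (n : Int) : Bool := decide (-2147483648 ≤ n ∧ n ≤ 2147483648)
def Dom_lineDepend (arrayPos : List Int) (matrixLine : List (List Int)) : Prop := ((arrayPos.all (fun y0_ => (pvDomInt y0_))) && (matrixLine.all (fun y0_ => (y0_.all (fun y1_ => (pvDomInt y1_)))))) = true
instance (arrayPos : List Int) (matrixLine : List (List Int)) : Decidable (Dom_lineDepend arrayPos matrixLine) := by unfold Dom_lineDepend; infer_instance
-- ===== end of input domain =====

-- B replaces A's per-suffix two phases (dependent-line filter, then a while loop that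
-- repeatedly rebuilds array3+array2) by one forward accumulator pass per suffix (simpler).

-- matrixLine[r][c] with Python index semantics; total via defaults — exact under Pre_
def pvMat (m : List (List Int)) (r c : Int) : Int :=
  PySem.List.pyGetD (PySem.List.pyGetD m r []) c 0

-- ===== PORT A =====
-- phase 1: workArray built from sliceArray by the dependent-line filter ('for i in range(1, len(sliceArray))')
def pvAWork (m : List (List Int)) (sliceArray : List Int) : List Int :=
  (PySem.List.pyRange 1 sliceArray.length 1).foldl
    (fun w i =>
      if pvMat m (PySem.List.pyGetD sliceArray 0 0 - 1) (PySem.List.pyGetD sliceArray i 0 - 1) == 1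
      then w ++ [PySem.List.pyGetD sliceArray i 0] else w) []

-- phase 2: the 'while (delIt < len(array1))' loop; fuel bounds the iteration count
-- (array1[delIt-1] is written out twice where Python names it 'row'; same value)
def pvAWhile (m : List (List Int)) : Nat → Nat → List Int → List Int → List Int
  | 0, _, a1, _ => a1
  | fuel + 1, delIt, a1, a3 =>
    if delIt < a1.length then
      pvAWhile m fuel (delIt + 1)
        ((a3 ++ [a1.getD (delIt - 1) 0]) ++
          (PySem.List.pyRange (delIt : Int) (a1.length : Int) 1).foldl
            (fun a2 j =>
              if pvMat m (a1.getD (delIt - 1) 0 - 1) (PySem.List.pyGetD a1 j 0 - 1) == 0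
              then a2 ++ [PySem.List.pyGetD a1 j 0] else a2) [])
        (a3 ++ [a1.getD (delIt - 1) 0])
    else a1

-- 'if len(workArray) > 1: … workArray = array1'
def pvATrim (m : List (List Int)) (workArray : List Int) : List Int :=
  if workArray.length > 1 then pvAWhile m workArray.length 1 workArray [] else workArray

-- body of A's outer loop for one posJ (sliceArray = arrayPos[posJ:len(arrayPos)], written out)
def pvARow (m : List (List Int)) (arrayPos : List Int) (posJ : Int) : List Int :=
  [PySem.List.pyGetD (PySem.List.slice arrayPos (some posJ) (some (arrayPos.length : Int))) 0 0] ++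
    pvATrim m
      (if (PySem.List.slice arrayPos (some posJ) (some (arrayPos.length : Int))).length > 1
       then pvAWork m (PySem.List.slice arrayPos (some posJ) (some (arrayPos.length : Int)))
       else [])

def lineDepend (arrayPos : List Int) (matrixLine : List (List Int)) : List (List Int) :=
  (PySem.List.pyRange 0 (arrayPos.length : Int) 1).foldl
    (fun ret posJ => ret ++ [pvARow matrixLine arrayPos posJ]) []

-- ===== PORT B =====
-- the kept-accumulator pass over arrayPos[posJ+1:]
def pvBKept (m : List (List Int)) (head : Int) (rest : List Int) : List Int :=
  rest.foldl
    (fun kept x =>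
      if pvMat m (head - 1) (x - 1) == 1 && kept.all (fun k => pvMat m (k - 1) (x - 1) == 0)
      then kept ++ [x] else kept) []

def lineDepend_alt (arrayPos : List Int) (matrixLine : List (List Int)) : List (List Int) :=
  (PySem.List.enumerate arrayPos 0).foldl
    (fun out p =>
      out ++ [p.2 :: pvBKept matrixLine p.2 (PySem.List.slice arrayPos (some (p.1 + 1)) none)]) []

-- ===== PRECONDITION & SPEC =====
-- Pre_ holds exactly when every matrix access matrixLine[arrayPos[i]-1][arrayPos[j]-1] (i < j)
-- that the Python A performs is a valid Python index; otherwise A raises IndexError.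
def Pre_lineDepend (arrayPos : List Int) (matrixLine : List (List Int)) : Prop :=
  ∀ i, i < arrayPos.length → ∀ j, j < arrayPos.length → i < j →
    (PySem.List.pyGet? matrixLine (arrayPos.getD i 0 - 1)).isSome ∧
    PySem.Raise.InRange ((PySem.List.pyGet? matrixLine (arrayPos.getD i 0 - 1)).getD []).length (arrayPos.getD j 0 - 1)
instance (arrayPos : List Int) (matrixLine : List (List Int)) : Decidable (Pre_lineDepend arrayPos matrixLine) := by unfold Pre_lineDepend; infer_instance

def pvWitness_lineDepend : List Int × List (List Int) := ([1, 2], [[1, 1], [0, 1]])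

def Spec_lineDepend (arrayPos : List Int) (matrixLine : List (List Int)) (out : List (List Int)) : Prop := out = lineDepend_alt arrayPos matrixLine
instance (arrayPos : List Int) (matrixLine : List (List Int)) (out : List (List Int)) : Decidable (Spec_lineDepend arrayPos matrixLine out) := by unfold Spec_lineDepend; infer_instance

-- ===== CLAIM (what is proved, stated in full; the proofs are below) =====
def Claim_equal_lineDepend : Prop := ∀ (arrayPos : List Int) (matrixLine : List (List Int)), Dom_lineDepend arrayPos matrixLine → Pre_lineDepend arrayPos matrixLine → Spec_lineDepend arrayPos matrixLine (lineDepend arrayPos matrixLine)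

-- ===== LEMMAS AND PROOFS =====

-- the greedy accumulator both programs compute per suffix
def pvGreedy (m : List (List Int)) (kept L : List Int) : List Int :=
  L.foldl (fun kept x => if kept.all (fun k => pvMat m (k - 1) (x - 1) == 0) then kept ++ [x] else kept) kept

theorem pvAWork_eq (m : List (List Int)) (h : Int) (r : List Int) :
    pvAWork m (h :: r) = r.filter (fun x => pvMat m (h - 1) (x - 1) == 1) := by
  unfold pvAWork
  rw [show ((h :: r).length : Int) = PySem.List.len (h :: r) by simp [PySem.List.len_eq],
      PySem.List.foldl_pyRange_pyGetD (h :: r) 0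
      (fun w x => if pvMat m (PySem.List.pyGetD (h :: r) 0 0 - 1) (x - 1) == 1 then w ++ [x] else w)
      [] (by omega : (0:Int) ≤ 1)]
  simp only [PySem.List.pyGetD_zero_cons]
  rw [PySem.List.foldl_append_if_eq_filter]
  simp

-- B's fused pass = dependent-line filter, then greedy
theorem pvBKept_fuse (m : List (List Int)) (h : Int) (r : List Int) : ∀ kept,
    r.foldl (fun kept x =>
      if pvMat m (h - 1) (x - 1) == 1 && kept.all (fun k => pvMat m (k - 1) (x - 1) == 0)
      then kept ++ [x] else kept) kept
    = pvGreedy m kept (r.filter (fun x => pvMat m (h - 1) (x - 1) == 1)) := by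
  induction r with
  | nil => intro kept; simp [pvGreedy]
  | cons y t ih =>
    intro kept
    cases hd : (pvMat m (h - 1) (y - 1) == 1) with
    | true =>
      simp only [List.foldl_cons, List.filter_cons, hd, Bool.true_and, pvGreedy, List.foldl_cons,
        if_true]
      rw [ih]; rfl
    | false =>
      simp only [List.foldl_cons, List.filter_cons, hd, Bool.false_and, Bool.false_eq_true,
        if_false]
      exact ih kept

theorem pvBKept_eq (m : List (List Int)) (h : Int) (r : List Int) :
    pvBKept m h r = pvGreedy m [] (r.filter (fun x => pvMat m (h - 1) (x - 1) == 1)) := by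
  unfold pvBKept; exact pvBKept_fuse m h r []

-- elements dependent on an already-kept line are skipped by the greedy pass anyway
theorem pvGreedy_filter (m : List (List Int)) (x0 : Int) (t : List Int) : ∀ kept, x0 ∈ kept →
    pvGreedy m kept (t.filter (fun y => pvMat m (x0 - 1) (y - 1) == 0)) = pvGreedy m kept t := by
  induction t with
  | nil => intro kept _; rfl
  | cons y t ih =>
    intro kept hx
    cases hy : (pvMat m (x0 - 1) (y - 1) == 0) with
    | true =>
      simp only [List.filter_cons, hy, if_true, pvGreedy, List.foldl_cons]
      cases hall : (kept.all fun k => pvMat m (k - 1) (y - 1) == 0) with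
      | true =>
        simp only [if_true]
        exact ih (kept ++ [y]) (List.mem_append_left _ hx)
      | false =>
        simp only [Bool.false_eq_true, if_false]
        exact ih kept hx
    | false =>
      have hall : (kept.all fun k => pvMat m (k - 1) (y - 1) == 0) = false := by
        rw [List.all_eq_false]; exact ⟨x0, hx, by simp [hy]⟩
      simp only [List.filter_cons, hy, Bool.false_eq_true, if_false, pvGreedy, List.foldl_cons,
        hall]
      exact ih kept hx

theorem pvGreedy_short (m : List (List Int)) (w : List Int) (hw : w.length ≤ 1) :
    pvGreedy m [] w = w := by
  match w, hw with
  | [], _ => rfl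
  | [x], _ => simp [pvGreedy]

-- A's while loop is the greedy pass, given kept-vs-pending independence
theorem pvAWhile_eq (m : List (List Int)) (fuel : Nat) : ∀ (a3 rest : List Int),
    rest.length ≤ fuel →
    (∀ x ∈ rest, ∀ k ∈ a3, pvMat m (k - 1) (x - 1) = 0) →
    pvAWhile m fuel (a3.length + 1) (a3 ++ rest) a3 = pvGreedy m a3 rest := by
  induction fuel with
  | zero =>
    intro a3 rest hf _
    have : rest = [] := List.eq_nil_of_length_eq_zero (Nat.le_zero.mp hf)
    subst this; simp [pvAWhile, pvGreedy]
  | succ fuel ih =>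
    intro a3 rest hf hinv
    match rest with
    | [] =>
      simp [pvAWhile, pvGreedy]
    | [x0] =>
      simp [pvAWhile, pvGreedy]
      intro k hk
      simpa using hinv x0 (by simp) k hk
    | x0 :: y :: t =>
      set t' := y :: t with ht'
      have hcond : a3.length + 1 < (a3 ++ x0 :: t').length := by simp [ht']
      rw [pvAWhile, if_pos hcond]
      have hpivot : (a3 ++ x0 :: t').getD (a3.length + 1 - 1) 0 = x0 := by
        simp [List.getD]
      rw [hpivot]
      -- the inner for-loop is a filter of t'
      have hlen : ((a3 ++ x0 :: t').length : Int) = PySem.List.len (a3 ++ x0 :: t') := by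
        simp [PySem.List.len_eq]
      rw [hlen,
        PySem.List.foldl_pyRange_pyGetD (a3 ++ x0 :: t') 0
          (fun a2 x => if pvMat m (x0 - 1) (x - 1) == 0 then a2 ++ [x] else a2) []
          (by positivity)]
      have hdrop : List.drop ((a3.length + 1 : Nat) : Int).toNat (a3 ++ x0 :: t') = t' := by
        rw [show ((a3.length + 1 : Nat) : Int).toNat = a3.length + 1 by simp]
        rw [show a3.length + 1 = (a3 ++ [x0]).length by simp,
          show a3 ++ x0 :: t' = (a3 ++ [x0]) ++ t' by simp]
        exact List.drop_left
      rw [hdrop, PySem.List.foldl_append_if_eq_filter]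
      set a2 := t'.filter (fun x => pvMat m (x0 - 1) (x - 1) == 0) with ha2
      have hstep : a3.length + 1 + 1 = (a3 ++ [x0]).length + 1 := by simp
      rw [List.nil_append, hstep, List.append_assoc]
      rw [show (a3 ++ ([x0] ++ a2)) = (a3 ++ [x0]) ++ a2 by simp]
      rw [ih (a3 ++ [x0]) a2
        (by
          have h1 : a2.length ≤ t'.length := by rw [ha2]; exact List.length_filter_le _ _
          have h2 : t'.length + 1 ≤ fuel + 1 := by simpa using hf
          omega)
        (by
          intro x hx k hk
          have hxt : x ∈ t' := List.mem_of_mem_filter hx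
          rcases List.mem_append.mp hk with hk | hk
          · exact hinv x (by simp [hxt]) k hk
          · have := (List.mem_filter.mp hx).2
            simp at hk
            subst hk
            simpa using this)]
      rw [pvGreedy_filter m x0 t' (a3 ++ [x0]) (by simp)]
      -- RHS: the first greedy step keeps x0
      simp only [pvGreedy, List.foldl_cons]
      rw [if_pos (show (a3.all fun k => pvMat m (k - 1) (x0 - 1) == 0) = true by
        rw [List.all_eq_true]; intro k hk; simpa using hinv x0 (by simp) k hk)]

theorem pvSlice_drop (arrayPos : List Int) (k : Nat) :
    PySem.List.slice arrayPos (some (k : Int)) (some (arrayPos.length : Int)) = arrayPos.drop k := by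
  rw [PySem.List.slice_toNat arrayPos (by positivity) (by positivity)]
  simp

theorem pvRow_eq (m : List (List Int)) (arrayPos : List Int) (k : Nat) (hk : k < arrayPos.length) :
    pvARow m arrayPos (k : Int) =
      arrayPos[k] :: pvGreedy m []
        ((arrayPos.drop (k + 1)).filter (fun x => pvMat m (arrayPos[k] - 1) (x - 1) == 1)) := by
  unfold pvARow
  rw [pvSlice_drop, List.drop_eq_getElem_cons hk]
  cases hr : arrayPos.drop (k + 1) with
  | nil =>
    simp [pvATrim, pvGreedy, PySem.List.pyGetD_zero_cons]
  | cons y t =>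
    rw [← hr]
    have hlen : (arrayPos[k] :: arrayPos.drop (k + 1)).length > 1 := by simp [hr]
    rw [if_pos hlen, pvAWork_eq, PySem.List.pyGetD_zero_cons]
    set w := (arrayPos.drop (k + 1)).filter (fun x => pvMat m (arrayPos[k] - 1) (x - 1) == 1) with hw
    unfold pvATrim
    by_cases hwl : w.length > 1
    · rw [if_pos hwl]
      have := pvAWhile_eq m w.length [] w (le_refl _) (by intro x _ k hk; simp at hk)
      simpa using this
    · rw [if_neg hwl, pvGreedy_short m w (by omega)]
      simp

theorem lineDepend_eq_alt (arrayPos : List Int) (matrixLine : List (List Int)) :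
    lineDepend arrayPos matrixLine = lineDepend_alt arrayPos matrixLine := by
  unfold lineDepend lineDepend_alt
  rw [PySem.List.foldl_append_singleton_eq_map (pvARow matrixLine arrayPos)]
  rw [PySem.List.enumerate_eq_map_pyRange arrayPos 0, List.foldl_map]
  rw [PySem.List.foldl_append_singleton_eq_map
    (fun j => (PySem.List.pyGetD arrayPos j 0) ::
      pvBKept matrixLine (PySem.List.pyGetD arrayPos j 0)
        (PySem.List.slice arrayPos (some (j + 1)) none))]
  simp only [List.nil_append, PySem.List.len_eq]
  apply List.map_congr_left
  intro j hj
  rw [PySem.List.mem_pyRange_one] at hj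
  obtain ⟨hj0, hjn⟩ := hj
  have hk : j = ((j.toNat : Nat) : Int) := by omega
  set k := j.toNat with hkdef
  have hklt : k < arrayPos.length := by omega
  rw [hk, pvRow_eq matrixLine arrayPos k hklt]
  have hget : PySem.List.pyGetD arrayPos ((k : Nat) : Int) 0 = arrayPos[k] := by
    simp [PySem.List.pyGetD_natCast, List.getD_eq_getElem?_getD, hklt]
  have hslice : PySem.List.slice arrayPos (some (((k : Nat) : Int) + 1)) none = arrayPos.drop (k + 1) := by
    rw [show (((k : Nat) : Int) + 1) = (((k + 1 : Nat)) : Int) by push_cast; ring,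
      PySem.List.slice_from arrayPos (by positivity)]
    simp
  rw [hget, hslice, pvBKept_eq]

-- ===== VERDICT (by name: the statement is the Claim_ definition above) =====
theorem lineDepend_spec : Claim_equal_lineDepend := by
  intro arrayPos matrixLine _ _
  exact lineDepend_eq_alt arrayPos matrixLine
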